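-- pv_equiv track=rewrite | github.com/sid-jo/spielbot | eval/retrieval_eval.py | format_metric_label
-- ===== SOURCE A (Python) =====
-- def format_metric_label(metric_key: str) -> str:
--     """Human-readable labels, e.g. recall_at_6 -> Recall@6."""
--     if metric_key == "mrr":
--         return "MRR"
--     if metric_key == "map":
--         return "MAP"
--     if metric_key == "r_precision":
--         return "R-Precision"
--     for prefix, name in (
--         ("ndcg_at_", "NDCG"),
--         ("recall_at_", "Recall"),
--         ("hit_rate_at_", "Hit rate"),
--         ("precision_at_", "Precision"),
--     ):
--         if metric_key.startswith(prefix):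
--             k = metric_key[len(prefix) :]
--             return f"{name}@{k}"
--     return metric_key.replace("_", " ").title()
-- ===== SOURCE B (Python) =====
-- def format_metric_label(metric_key: str) -> str:
--     """Human-readable labels, e.g. recall_at_6 -> Recall@6."""
--     match metric_key.split("_"):
--         case ["mrr"]:
--             return "MRR"
--         case ["map"]:
--             return "MAP"
--         case ["r", "precision"]:
--             return "R-Precision"
--         case ["ndcg", "at", first, *rest]:
--             return "NDCG@" + "_".join([first, *rest])
--         case ["recall", "at", first, *rest]:
--             return "Recall@" + "_".join([first, *rest])
--         case ["hit", "rate", "at", first, *rest]: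
--             return "Hit rate@" + "_".join([first, *rest])
--         case ["precision", "at", first, *rest]:
--             return "Precision@" + "_".join([first, *rest])
--         case _:
--             return metric_key.replace("_", " ").title()
-- ===== Notes on version B (the rewrite author's own statement) =====
-- stated objective: alternative
-- what changed: B tokenizes the key once on underscores and structurally pattern-matches the resulting token list (Python match/case with a starred tail that is rejoined), instead of A's chain of whole-string equality tests followed by a scan over four string prefixes with startswith and slicing.
import Mathlib
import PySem

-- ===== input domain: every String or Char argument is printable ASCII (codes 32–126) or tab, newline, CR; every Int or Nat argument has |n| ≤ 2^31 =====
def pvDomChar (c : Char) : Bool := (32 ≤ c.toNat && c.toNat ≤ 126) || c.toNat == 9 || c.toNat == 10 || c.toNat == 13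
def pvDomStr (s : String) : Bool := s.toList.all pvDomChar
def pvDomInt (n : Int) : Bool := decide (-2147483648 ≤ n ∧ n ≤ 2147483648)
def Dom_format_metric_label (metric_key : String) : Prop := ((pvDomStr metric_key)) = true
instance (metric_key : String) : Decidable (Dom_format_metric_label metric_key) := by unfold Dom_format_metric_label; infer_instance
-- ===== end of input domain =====

-- B tokenizes the key on '_' once and pattern-matches the token list (rejoining the tail),
-- instead of A's equality checks plus a scan over four string prefixes (objective: alternative).

-- shared helper: hand port of Python's str.title(), exact on the ASCII domain (there 'cased' = isalpha);
-- both Pythons call the same `.replace("_", " ").title()` fallback, so both ports share it.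
def pyTitle : List Char → Bool → List Char
  | [], _ => []
  | c :: rest, prev =>
    (if PySem.Chars.isalpha c then
      (if prev then PySem.Chars.lowerChar c else PySem.Chars.upperChar c)
     else c) :: pyTitle rest (PySem.Chars.isalpha c)

def titleFallback (cs : List Char) : String :=
  String.ofList (pyTitle (PySem.Chars.replace cs ['_'] [' ']) false)

-- ===== PORT A =====
def aPrefixes : List (List Char × String) :=
  [(['n','d','c','g','_','a','t','_'], "NDCG"),
   (['r','e','c','a','l','l','_','a','t','_'], "Recall"),
   (['h','i','t','_','r','a','t','e','_','a','t','_'], "Hit rate"),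
   (['p','r','e','c','i','s','i','o','n','_','a','t','_'], "Precision")]

def aLoop (key : List Char) : List (List Char × String) → Option String
  | [] => none
  | (p, nm) :: rest =>
    if PySem.Chars.startswith key p then
      some (nm ++ "@" ++ String.ofList (PySem.Chars.slice key (some (p.length : Int)) none))
    else aLoop key rest

def format_metric_label (metric_key : String) : String :=
  if metric_key = "mrr" then "MRR"
  else if metric_key = "map" then "MAP"
  else if metric_key = "r_precision" then "R-Precision"
  else
    match aLoop metric_key.toList aPrefixes with
    | some s => s
    | none => titleFallback metric_key.toList

-- ===== PORT B =====
def format_metric_label_alt (metric_key : String) : String :=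
  match PySem.Chars.splitOn metric_key.toList ['_'] with
  | [['m','r','r']] => "MRR"
  | [['m','a','p']] => "MAP"
  | [['r'], ['p','r','e','c','i','s','i','o','n']] => "R-Precision"
  | ['n','d','c','g'] :: ['a','t'] :: first :: rest =>
      "NDCG@" ++ String.ofList (PySem.Chars.join ['_'] (first :: rest))
  | ['r','e','c','a','l','l'] :: ['a','t'] :: first :: rest =>
      "Recall@" ++ String.ofList (PySem.Chars.join ['_'] (first :: rest))
  | ['h','i','t'] :: ['r','a','t','e'] :: ['a','t'] :: first :: rest =>
      "Hit rate@" ++ String.ofList (PySem.Chars.join ['_'] (first :: rest))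
  | ['p','r','e','c','i','s','i','o','n'] :: ['a','t'] :: first :: rest =>
      "Precision@" ++ String.ofList (PySem.Chars.join ['_'] (first :: rest))
  | _ => titleFallback metric_key.toList

-- ===== PRECONDITION & SPEC =====
def Spec_format_metric_label (metric_key : String) (out : String) : Prop := out = format_metric_label_alt metric_key
instance (metric_key : String) (out : String) : Decidable (Spec_format_metric_label metric_key out) := by unfold Spec_format_metric_label; infer_instance

-- ===== CLAIM (what is proved, stated in full; the proofs are below) =====
def Claim_equal_format_metric_label : Prop := ∀ (metric_key : String), Dom_format_metric_label metric_key → Spec_format_metric_label metric_key (format_metric_label metric_key)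

-- ===== LEMMAS AND PROOFS =====

-- structural model of Python's key.split("_")
def splitU : List Char → List (List Char)
  | [] => [[]]
  | c :: rest => if c = '_' then [] :: splitU rest else (splitU rest).modifyHead (c :: ·)

theorem splitU_cons : ∀ l : List Char, ∃ h tl, splitU l = h :: tl := by
  intro l
  induction l with
  | nil => exact ⟨[], [], rfl⟩
  | cons c rest ih =>
    obtain ⟨h, tl, ht⟩ := ih
    by_cases hc : c = '_'
    · exact ⟨[], splitU rest, by simp [splitU, hc]⟩
    · exact ⟨c :: h, tl, by simp [splitU, hc, ht]⟩

theorem go_spec (fuel : Nat) : ∀ (l cur : List Char) (acc : List (List Char)), l.length < fuel →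
    PySem.Chars.splitOn.go ['_'] fuel l cur acc = acc.reverse ++ (splitU l).modifyHead (cur.reverse ++ ·) := by
  induction fuel with
  | zero => intro l cur acc h; omega
  | succ f ih =>
    intro l cur acc h
    match l with
    | [] => simp [PySem.Chars.splitOn.go, splitU]
    | c :: rest =>
      rw [PySem.Chars.splitOn.go]
      by_cases hc : c = '_'
      · subst hc
        rw [if_pos (by simp [List.isPrefixOf])]
        rw [ih _ _ _ (by simpa using Nat.lt_of_succ_lt_succ h)]
        obtain ⟨h0, tl, ht⟩ := splitU_cons rest
        simp [splitU, ht]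
      · rw [if_neg (by simp [List.isPrefixOf]; exact fun h => hc h.symm)]
        rw [ih _ _ _ (by simpa using Nat.lt_of_succ_lt_succ h)]
        obtain ⟨h0, tl, ht⟩ := splitU_cons rest
        simp [splitU, hc, ht]

theorem splitOn_eq_splitU (l : List Char) : PySem.Chars.splitOn l ['_'] = splitU l := by
  rw [PySem.Chars.splitOn, go_spec _ _ _ _ (by omega)]
  obtain ⟨h0, tl, ht⟩ := splitU_cons l
  simp [ht]

theorem join_splitU (l : List Char) : PySem.Chars.join ['_'] (splitU l) = l := by
  induction l with
  | nil => rfl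
  | cons c rest ih =>
    obtain ⟨h0, tl, ht⟩ := splitU_cons rest
    by_cases hc : c = '_'
    · subst hc
      rw [show splitU ('_' :: rest) = [] :: splitU rest by simp [splitU]]
      rw [ht] at ih ⊢
      simp only [PySem.Chars.join, List.intercalate] at ih ⊢
      simp [List.intersperse] at ih ⊢
      exact ih
    · rw [show splitU (c :: rest) = (c :: h0) :: tl by simp [splitU, hc, ht]]
      rw [ht] at ih
      simp only [PySem.Chars.join, List.intercalate] at ih ⊢
      cases tl <;> simp_all [List.intersperse]

theorem toList_inj_lit (key : String) (lit : List Char) (h : key.toList = lit) :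
    key = String.ofList lit := by
  have := congrArg String.ofList h
  simpa using this

theorem main_eq (key : String) : format_metric_label key = format_metric_label_alt key := by
  by_cases h1 : key = "mrr"
  · subst h1; decide
  by_cases h2 : key = "map"
  · subst h2; decide
  by_cases h3 : key = "r_precision"
  · subst h3; decide
  by_cases p4 : PySem.Chars.startswith key.toList ['n','d','c','g','_','a','t','_'] = true
  · obtain ⟨t, hcs⟩ := (PySem.Chars.startswith_iff _ _).mp p4
    have hcs' : key.toList = ['n','d','c','g'] ++ '_'::'a'::'t'::'_'::t := hcs.symm
    obtain ⟨h0, tl, ht⟩ := splitU_cons t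
    have hsp : splitU key.toList = ['n','d','c','g'] :: ['a','t'] :: h0 :: tl := by
      rw [hcs']; simp [splitU, ht]
    have hA : format_metric_label key = "NDCG" ++ "@" ++ String.ofList t := by
      unfold format_metric_label
      rw [if_neg h1, if_neg h2, if_neg h3]
      simp only [aLoop, aPrefixes]
      rw [if_pos p4]
      simp only [PySem.Chars.slice_eq_listSlice]
      rw [PySem.List.slice_from _ (by norm_num : (0:Int) ≤ ((['n','d','c','g','_','a','t','_'].length : Nat) : Int))]
      rw [hcs']; rfl
    have hB : format_metric_label_alt key = "NDCG@" ++ String.ofList t := by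
      unfold format_metric_label_alt
      rw [splitOn_eq_splitU, hsp]
      show "NDCG@" ++ String.ofList (PySem.Chars.join ['_'] (h0 :: tl)) = _
      rw [← ht, join_splitU]
    rw [hA, hB, show ("NDCG" : String) ++ "@" = "NDCG@" from by decide]
  by_cases p6 : PySem.Chars.startswith key.toList ['r','e','c','a','l','l','_','a','t','_'] = true
  · obtain ⟨t, hcs⟩ := (PySem.Chars.startswith_iff _ _).mp p6
    have hcs' : key.toList = ['r','e','c','a','l','l'] ++ '_'::'a'::'t'::'_'::t := hcs.symm
    obtain ⟨h0, tl, ht⟩ := splitU_cons t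
    have hsp : splitU key.toList = ['r','e','c','a','l','l'] :: ['a','t'] :: h0 :: tl := by
      rw [hcs']; simp [splitU, ht]
    have hA : format_metric_label key = "Recall" ++ "@" ++ String.ofList t := by
      unfold format_metric_label
      rw [if_neg h1, if_neg h2, if_neg h3]
      simp only [aLoop, aPrefixes]
      rw [if_neg p4, if_pos p6]
      simp only [PySem.Chars.slice_eq_listSlice]
      rw [PySem.List.slice_from _ (by norm_num : (0:Int) ≤ ((['r','e','c','a','l','l','_','a','t','_'].length : Nat) : Int))]
      rw [hcs']; rfl
    have hB : format_metric_label_alt key = "Recall@" ++ String.ofList t := by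
      unfold format_metric_label_alt
      rw [splitOn_eq_splitU, hsp]
      show "Recall@" ++ String.ofList (PySem.Chars.join ['_'] (h0 :: tl)) = _
      rw [← ht, join_splitU]
    rw [hA, hB, show ("Recall" : String) ++ "@" = "Recall@" from by decide]
  by_cases p8 : PySem.Chars.startswith key.toList ['h','i','t','_','r','a','t','e','_','a','t','_'] = true
  · obtain ⟨t, hcs⟩ := (PySem.Chars.startswith_iff _ _).mp p8
    have hcs' : key.toList = ['h','i','t','_','r','a','t','e'] ++ '_'::'a'::'t'::'_'::t := hcs.symm
    obtain ⟨h0, tl, ht⟩ := splitU_cons t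
    have hsp : splitU key.toList = ['h','i','t'] :: ['r','a','t','e'] :: ['a','t'] :: h0 :: tl := by
      rw [hcs']; simp [splitU, ht]
    have hA : format_metric_label key = "Hit rate" ++ "@" ++ String.ofList t := by
      unfold format_metric_label
      rw [if_neg h1, if_neg h2, if_neg h3]
      simp only [aLoop, aPrefixes]
      rw [if_neg p4, if_neg p6, if_pos p8]
      simp only [PySem.Chars.slice_eq_listSlice]
      rw [PySem.List.slice_from _ (by norm_num : (0:Int) ≤ ((['h','i','t','_','r','a','t','e','_','a','t','_'].length : Nat) : Int))]
      rw [hcs']; rfl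
    have hB : format_metric_label_alt key = "Hit rate@" ++ String.ofList t := by
      unfold format_metric_label_alt
      rw [splitOn_eq_splitU, hsp]
      show "Hit rate@" ++ String.ofList (PySem.Chars.join ['_'] (h0 :: tl)) = _
      rw [← ht, join_splitU]
    rw [hA, hB, show ("Hit rate" : String) ++ "@" = "Hit rate@" from by decide]
  by_cases p9 : PySem.Chars.startswith key.toList ['p','r','e','c','i','s','i','o','n','_','a','t','_'] = true
  · obtain ⟨t, hcs⟩ := (PySem.Chars.startswith_iff _ _).mp p9
    have hcs' : key.toList = ['p','r','e','c','i','s','i','o','n'] ++ '_'::'a'::'t'::'_'::t := hcs.symm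
    obtain ⟨h0, tl, ht⟩ := splitU_cons t
    have hsp : splitU key.toList = ['p','r','e','c','i','s','i','o','n'] :: ['a','t'] :: h0 :: tl := by
      rw [hcs']; simp [splitU, ht]
    have hA : format_metric_label key = "Precision" ++ "@" ++ String.ofList t := by
      unfold format_metric_label
      rw [if_neg h1, if_neg h2, if_neg h3]
      simp only [aLoop, aPrefixes]
      rw [if_neg p4, if_neg p6, if_neg p8, if_pos p9]
      simp only [PySem.Chars.slice_eq_listSlice]
      rw [PySem.List.slice_from _ (by norm_num : (0:Int) ≤ ((['p','r','e','c','i','s','i','o','n','_','a','t','_'].length : Nat) : Int))]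
      rw [hcs']; rfl
    have hB : format_metric_label_alt key = "Precision@" ++ String.ofList t := by
      unfold format_metric_label_alt
      rw [splitOn_eq_splitU, hsp]
      show "Precision@" ++ String.ofList (PySem.Chars.join ['_'] (h0 :: tl)) = _
      rw [← ht, join_splitU]
    rw [hA, hB, show ("Precision" : String) ++ "@" = "Precision@" from by decide]
  -- no special key and no prefix matches: both fall back to replace/title
  have hA : format_metric_label key = titleFallback key.toList := by
    unfold format_metric_label
    rw [if_neg h1, if_neg h2, if_neg h3]
    simp only [aLoop, aPrefixes]
    rw [if_neg p4, if_neg p6, if_neg p8, if_neg p9]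
  rw [hA]
  unfold format_metric_label_alt
  rw [splitOn_eq_splitU]
  split
  · next heq =>
    exact absurd (toList_inj_lit key _ (by rw [← join_splitU key.toList, heq]; rfl)) h1
  · next heq =>
    exact absurd (toList_inj_lit key _ (by rw [← join_splitU key.toList, heq]; rfl)) h2
  · next heq =>
    exact absurd (toList_inj_lit key _ (by rw [← join_splitU key.toList, heq]; rfl)) h3
  · next first rest heq =>
    have hk : key.toList = ['n','d','c','g','_','a','t','_'] ++ PySem.Chars.join ['_'] (first :: rest) := by
      rw [← join_splitU key.toList, heq, PySem.Chars.join_cons_cons, PySem.Chars.join_cons_cons]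
      simp
    exact absurd ((PySem.Chars.startswith_iff _ _).mpr ⟨_, hk.symm⟩) p4
  · next first rest heq =>
    have hk : key.toList = ['r','e','c','a','l','l','_','a','t','_'] ++ PySem.Chars.join ['_'] (first :: rest) := by
      rw [← join_splitU key.toList, heq, PySem.Chars.join_cons_cons, PySem.Chars.join_cons_cons]
      simp
    exact absurd ((PySem.Chars.startswith_iff _ _).mpr ⟨_, hk.symm⟩) p6
  · next first rest heq =>
    have hk : key.toList = ['h','i','t','_','r','a','t','e','_','a','t','_'] ++ PySem.Chars.join ['_'] (first :: rest) := by
      rw [← join_splitU key.toList, heq, PySem.Chars.join_cons_cons, PySem.Chars.join_cons_cons,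
          PySem.Chars.join_cons_cons]
      simp
    exact absurd ((PySem.Chars.startswith_iff _ _).mpr ⟨_, hk.symm⟩) p8
  · next first rest heq =>
    have hk : key.toList = ['p','r','e','c','i','s','i','o','n','_','a','t','_'] ++ PySem.Chars.join ['_'] (first :: rest) := by
      rw [← join_splitU key.toList, heq, PySem.Chars.join_cons_cons, PySem.Chars.join_cons_cons]
      simp
    exact absurd ((PySem.Chars.startswith_iff _ _).mpr ⟨_, hk.symm⟩) p9
  · rfl

-- ===== VERDICT (by name: the statement is the Claim_ definition above) =====
theorem format_metric_label_spec : Claim_equal_format_metric_label := by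
  intro key _
  exact main_eq key
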